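-- pv_equiv track=rewrite | github.com/shenlanyilang/MaxentDemo | preprocessing.py | labeling_sent
-- ===== SOURCE A (Python) =====
-- from typing import List,Set,Dict
--
-- def labeling_sent(sent:List[str])->List[str]:
--     res = []
--     for words in sent:
--         if len(words) == 1:
--             res.append(words + '/' + 'S')
--         elif len(words) == 2:
--             res.append(words[0] + '/' + 'B')
--             res.append(words[1] + '/' + 'E')
--         else:
--             res.append(words[0] + '/' + 'B')
--             res.extend([w + '/' + 'M' for w in words[1:-1]])
--             res.append(words[-1] + '/' + 'E')
--     return res
-- ===== SOURCE B (Python) =====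
-- from typing import List
--
-- def labeling_sent(sent: List[str]) -> List[str]:
--     # staged: flatten all characters, build the whole BMES tag string, then zip
--     chars = [c for w in sent for c in w]
--     tags = ''.join('B' + 'M' * (len(w) - 2) + 'E' if len(w) > 1 else 'S' * len(w)
--                    for w in sent)
--     return [c + '/' + t for c, t in zip(chars, tags)]
-- ===== Notes on version B (the rewrite author's own statement) =====
-- stated objective: alternative
-- what changed: Instead of per-word branch-and-append, B works in stages: it flattens the sentence to one character list, builds the whole BMES tag pattern string separately ('B'+'M'*(n-2)+'E' per word), and zips the two streams.
import Mathlib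
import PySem

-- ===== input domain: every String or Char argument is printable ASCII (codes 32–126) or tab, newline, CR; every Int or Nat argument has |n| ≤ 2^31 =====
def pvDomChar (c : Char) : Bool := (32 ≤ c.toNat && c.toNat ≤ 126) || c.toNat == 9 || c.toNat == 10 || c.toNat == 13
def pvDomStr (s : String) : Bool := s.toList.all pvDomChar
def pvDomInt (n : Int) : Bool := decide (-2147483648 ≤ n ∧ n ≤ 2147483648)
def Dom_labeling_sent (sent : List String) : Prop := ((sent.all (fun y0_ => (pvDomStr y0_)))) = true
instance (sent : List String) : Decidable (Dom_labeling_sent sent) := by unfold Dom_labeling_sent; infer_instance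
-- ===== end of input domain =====

-- B replaces A's per-word branch-and-append by a staged construction: flatten the
-- sentence to one character list, build the whole BMES tag pattern separately, zip
-- the two streams (alternative decomposition, same cost).

-- ===== PORT A =====
-- A's per-word branches: len==1 / len==2 / else with words[0], words[1:-1], words[-1].
-- Python string indexing/slicing ported via PySem on the char list; pyGetD's IndexError
-- cases (words[0]/words[-1] on an empty word) are exactly what Pre_labeling_sent excludes.
def pvWordA (w : String) : List String :=
  if w.toList.length = 1 then
    [String.ofList (w.toList ++ ['/', 'S'])]
  else if w.toList.length = 2 then
    [String.ofList ([PySem.List.pyGetD w.toList 0 ' '] ++ ['/', 'B'])]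
      ++ [String.ofList ([PySem.List.pyGetD w.toList 1 ' '] ++ ['/', 'E'])]
  else
    [String.ofList ([PySem.List.pyGetD w.toList 0 ' '] ++ ['/', 'B'])]
      ++ (PySem.List.slice w.toList (some 1) (some (-1))).map
           (fun c => String.ofList ([c] ++ ['/', 'M']))
      ++ [String.ofList ([PySem.List.pyGetD w.toList (-1) ' '] ++ ['/', 'E'])]

def labeling_sent (sent : List String) : List String :=
  sent.foldl (fun res w => res ++ pvWordA w) []

-- ===== PORT B =====
-- the per-word tag pattern: 'B'+'M'*(n-2)+'E' if n>1 else 'S'*n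
def pvPattern (w : String) : List Char :=
  if w.toList.length > 1 then 'B' :: (List.replicate (w.toList.length - 2) 'M' ++ ['E'])
  else List.replicate w.toList.length 'S'

def labeling_sent_alt (sent : List String) : List String :=
  ((sent.flatMap String.toList).zip (sent.flatMap pvPattern)).map
    (fun p => String.ofList [p.1, '/', p.2])

-- ===== PRECONDITION & SPEC =====
-- Pre_ excludes only sentences containing an empty-string word, on which A raises IndexError (words[0]).
def Pre_labeling_sent (sent : List String) : Prop := ∀ w ∈ sent, w.toList ≠ []
instance (sent : List String) : Decidable (Pre_labeling_sent sent) := by unfold Pre_labeling_sent; infer_instance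
def pvWitness_labeling_sent : List String := ["a", "ab", "abc", "hello"]

def Spec_labeling_sent (sent : List String) (out : List String) : Prop := out = labeling_sent_alt sent
instance (sent : List String) (out : List String) : Decidable (Spec_labeling_sent sent out) := by unfold Spec_labeling_sent; infer_instance

-- ===== CLAIM (what is proved, stated in full; the proofs are below) =====
def Claim_equal_labeling_sent : Prop := ∀ (sent : List String), Dom_labeling_sent sent → Pre_labeling_sent sent → Spec_labeling_sent sent (labeling_sent sent)

-- ===== LEMMAS AND PROOFS =====

lemma pattern_length (w : String) : (pvPattern w).length = w.toList.length := by
  unfold pvPattern; split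
  · simp only [List.length_cons, List.length_append, List.length_replicate, List.length_nil]
    omega
  · simp

-- zipping a list with an equal-length 'M' pattern labels each character 'M'
lemma zip_replicate_M (mid : List Char) :
    (mid.zip (List.replicate mid.length 'M')).map (fun p => String.ofList [p.1, '/', p.2])
    = mid.map (fun c => String.ofList ([c] ++ ['/', 'M'])) := by
  induction mid with
  | nil => rfl
  | cons c cs ih => simp only [List.length_cons, List.replicate_succ, List.zip_cons_cons,
      List.map_cons, ih]; rfl

-- per-word agreement on a nonempty word: A's branch output equals B's word-level zip
lemma word_eq (w : String) (h : w.toList ≠ []) :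
    pvWordA w = (w.toList.zip (pvPattern w)).map (fun p => String.ofList [p.1, '/', p.2]) := by
  unfold pvWordA pvPattern
  match hcs : w.toList with
  | [] => exact (h hcs).elim
  | [c] => simp
  | [c1, c2] => simp [PySem.List.pyGetD]
  | c0 :: c1 :: c2 :: rest =>
    obtain ⟨mid, clast, hmid⟩ : ∃ mid clast, c1 :: c2 :: rest = mid ++ [clast] := by
      rcases List.eq_nil_or_concat (c1 :: c2 :: rest) with h' | ⟨mid, clast, h'⟩
      · simp at h'
      · exact ⟨mid, clast, by simpa using h'⟩
    have hne1 : ¬ ((c0 :: c1 :: c2 :: rest).length = 1) := by simp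
    have hne2 : ¬ ((c0 :: c1 :: c2 :: rest).length = 2) := by simp
    have hgt : (c0 :: c1 :: c2 :: rest).length > 1 := by simp
    rw [if_neg hne1, if_neg hne2, if_pos hgt]
    have hlist : c0 :: c1 :: c2 :: rest = c0 :: (mid ++ [clast]) := by rw [hmid]
    rw [hlist]
    have hlen : (c0 :: (mid ++ [clast])).length - 2 = mid.length := by simp
    rw [hlen]
    rw [show PySem.List.pyGetD (c0 :: (mid ++ [clast])) 0 ' ' = c0 from
      PySem.List.pyGetD_zero_cons _ _ _]
    rw [show PySem.List.pyGetD (c0 :: (mid ++ [clast])) (-1) ' ' = clast by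
      have hshape : c0 :: (mid ++ [clast]) = (c0 :: mid) ++ [clast] := by simp
      rw [hshape]; exact PySem.List.pyGetD_neg_one_append_singleton _ _ _]
    have hsl : PySem.List.slice (c0 :: (mid ++ [clast])) (some 1) (some (-1)) = mid := by
      simp [PySem.List.slice]
    rw [hsl]
    rw [List.zip_cons_cons, List.map_cons]
    rw [List.zip_append (by simp)]
    simp only [List.map_append, zip_replicate_M]
    simp

-- on a sentence of nonempty words, the two flattened streams zip word by word
lemma main_eq (sent : List String) (hpre : ∀ w ∈ sent, w.toList ≠ []) :
    sent.flatMap pvWordA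
    = ((sent.flatMap String.toList).zip (sent.flatMap pvPattern)).map
        (fun p => String.ofList [p.1, '/', p.2]) := by
  induction sent with
  | nil => rfl
  | cons w ws ih =>
    simp only [List.flatMap_cons]
    rw [List.zip_append (by rw [pattern_length]), List.map_append,
        ih (fun x hx => hpre x (List.mem_cons_of_mem _ hx)),
        word_eq w (hpre w List.mem_cons_self)]

-- ===== VERDICT (by name: the statement is the Claim_ definition above) =====
theorem labeling_sent_spec : Claim_equal_labeling_sent := by
  intro sent _ hpre
  unfold Spec_labeling_sent labeling_sent labeling_sent_alt
  rw [PySem.List.foldl_append_eq_flatMap pvWordA sent []]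
  simpa using main_eq sent hpre
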